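-- pv_equiv track=rewrite | github.com/a-esh/sorwave | sorwave/music_logger.py | filter_artist
-- ===== SOURCE A (Python) =====
-- def filter_artist(artist):
--     name_exceptions = ["Zion & Lennox","AC/DC", "Flamman & Abraxas"]
--
--     for exception in name_exceptions:
--         if exception in artist:
--             return exception
--
--     dividers = [",", "/", "Ft.", "feat.", "Feat", "&"]
--     for fix in dividers:
--         artist = artist.split(fix)[0].strip()
--     return artist
-- ===== SOURCE B (Python) =====
-- def filter_artist(artist):
--     name_exceptions = ["Zion & Lennox", "AC/DC", "Flamman & Abraxas"]
--
--     for exception in name_exceptions: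
--         if exception in artist:
--             return exception
--
--     dividers = [",", "/", "Ft.", "feat.", "Feat", "&"]
--     positions = [p for p in (artist.find(d) for d in dividers) if p != -1]
--     if positions:
--         artist = artist[:min(positions)]
--     return artist.strip()
-- ===== Notes on version B (the rewrite author's own statement) =====
-- stated objective: alternative
-- what changed: Instead of six successive split(divider)[0].strip() reassignments, B computes each divider's position with one find() pass, cuts the string once at the leftmost found divider, and strips once.
import Mathlib
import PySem

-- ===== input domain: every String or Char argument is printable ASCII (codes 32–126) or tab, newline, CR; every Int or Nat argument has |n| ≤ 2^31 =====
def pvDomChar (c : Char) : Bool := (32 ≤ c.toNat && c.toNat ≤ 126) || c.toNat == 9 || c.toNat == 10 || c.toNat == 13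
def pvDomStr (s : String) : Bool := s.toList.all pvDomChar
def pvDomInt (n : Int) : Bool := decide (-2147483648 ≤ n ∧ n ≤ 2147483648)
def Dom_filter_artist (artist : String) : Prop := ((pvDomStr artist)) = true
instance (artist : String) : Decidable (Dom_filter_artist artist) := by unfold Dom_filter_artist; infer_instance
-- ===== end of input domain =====

-- B replaces A's six successive split(divider)[0].strip() rounds by one find() pass over the
-- dividers, a single cut at the leftmost found divider, and a single strip (objective: alternative).


-- ===== PORT A =====
-- A's exceptions loop with early return
def excLoopA : List String → String → Option String
  | [], _ => none
  | e :: rest, a => if PySem.Str.isIn e a then some e else excLoopA rest a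

-- `artist.split(fix)[0]` never raises: fix is a nonempty literal and split returns a nonempty
-- list, so the `.getD`/`pyGetD` defaults below are unreachable.
def filter_artist (artist : String) : String :=
  match excLoopA ["Zion & Lennox", "AC/DC", "Flamman & Abraxas"] artist with
  | some e => e
  | none =>
    List.foldl
      (fun a fix => PySem.Str.strip (PySem.List.pyGetD ((PySem.Str.split? a fix).getD []) 0 ""))
      artist [",", "/", "Ft.", "feat.", "Feat", "&"]

-- ===== PORT B =====
def excLoopB : List String → String → Option String
  | [], _ => none
  | e :: rest, a => if PySem.Str.isIn e a then some e else excLoopB rest a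

def filter_artist_alt (artist : String) : String :=
  match excLoopB ["Zion & Lennox", "AC/DC", "Flamman & Abraxas"] artist with
  | some e => e
  | none =>
    PySem.Str.strip
      (match PySem.List.min?
          (([",", "/", "Ft.", "feat.", "Feat", "&"].map
            (fun d => PySem.Str.find artist d)).filter (fun p => p != -1))
          (fun p => p) with
        | some m => PySem.Str.slice artist none (some m)  -- artist[:min(positions)]
        | none => artist)                                 -- positions empty

-- ===== PRECONDITION & SPEC =====
def Spec_filter_artist (artist : String) (out : String) : Prop := out = filter_artist_alt artist
instance (artist : String) (out : String) : Decidable (Spec_filter_artist artist out) := by unfold Spec_filter_artist; infer_instance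

-- ===== CLAIM (what is proved, stated in full; the proofs are below) =====
def Claim_equal_filter_artist : Prop := ∀ (artist : String), Dom_filter_artist artist → Spec_filter_artist artist (filter_artist artist)

-- ===== LEMMAS AND PROOFS =====

-- first characters of the dividers; no divider contains such a character past position 0
def pvFC (c : Char) : Bool := c == ',' || c == '/' || c == 'F' || c == 'f' || c == '&'

-- a well-behaved divider: nonempty, no whitespace, starts with a pvFC char, no pvFC char later
def pvGood : List Char → Prop
  | [] => False
  | c :: t => (∀ x ∈ c :: t, PySem.Chars.isspace x = false) ∧ pvFC c = true ∧ ∀ x ∈ t, pvFC x = false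

-- position of the first occurrence of sep in l (none if sep does not occur)
def pvFo? (sep : List Char) : List Char → Option Nat
  | [] => none
  | c :: t => if sep.isPrefixOf (c :: t) then some 0 else (pvFo? sep t).map (· + 1)

def pvFoN (sep l : List Char) : Nat := (pvFo? sep l).getD l.length

-- l cut just before the first occurrence of d (whole l if d does not occur)
def pvCut (l d : List Char) : List Char := l.take (pvFoN d l)

-- one round of A's loop: artist = artist.split(fix)[0].strip()
def pvStepA (d l : List Char) : List Char := PySem.Chars.strip (pvCut l d)

-- leftmost first-occurrence position over a list of dividers (l.length if none occurs)
def pvMfo (l : List Char) : List (List Char) → Nat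
  | [] => l.length
  | d :: D => min (pvFoN d l) (pvMfo l D)

theorem pvGood_ne {d : List Char} (hg : pvGood d) : d ≠ [] := by
  cases d
  · simp [pvGood] at hg
  · simp

theorem pvFo?_some (sep l : List Char) (q : Nat) (h : pvFo? sep l = some q) :
    sep <+: l.drop q ∧ ∀ j < q, ¬ sep <+: l.drop j := by
  induction l generalizing q with
  | nil => simp [pvFo?] at h
  | cons c t ih =>
    rw [pvFo?] at h
    by_cases hp : sep.isPrefixOf (c :: t)
    · simp [hp] at h
      subst h
      exact ⟨List.isPrefixOf_iff_prefix.mp hp, by omega⟩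
    · rw [if_neg hp] at h
      cases hq : pvFo? sep t with
      | none => simp [hq] at h
      | some q' =>
        simp [hq] at h
        subst h
        obtain ⟨h1, h2⟩ := ih q' hq
        refine ⟨h1, ?_⟩
        intro j hj
        cases j with
        | zero => simpa [List.isPrefixOf_iff_prefix] using hp
        | succ j' => exact h2 j' (by omega)

theorem pvFo?_none (sep l : List Char) (hsep : sep ≠ []) (h : pvFo? sep l = none) :
    ∀ j, ¬ sep <+: l.drop j := by
  induction l with
  | nil =>
    intro j hj
    simp at hj
    exact hsep hj
  | cons c t ih =>
    rw [pvFo?] at h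
    by_cases hp : sep.isPrefixOf (c :: t)
    · simp [hp] at h
    · rw [if_neg hp] at h
      cases hq : pvFo? sep t with
      | some q' => simp [hq] at h
      | none =>
        intro j
        cases j with
        | zero => simpa [List.isPrefixOf_iff_prefix] using hp
        | succ j' => exact ih hq j'

theorem pvFo?_eq_some_of (sep l : List Char) (hsep : sep ≠ []) (q : Nat)
    (h1 : sep <+: l.drop q) (h2 : ∀ j < q, ¬ sep <+: l.drop j) : pvFo? sep l = some q := by
  cases h : pvFo? sep l with
  | none => exact absurd h1 (pvFo?_none sep l hsep h q)
  | some q' =>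
    obtain ⟨g1, g2⟩ := pvFo?_some sep l q' h
    rcases Nat.lt_trichotomy q q' with hlt | hlt | hlt
    · exact absurd h1 (g2 q hlt)
    · rw [hlt]
    · exact absurd g1 (h2 q' hlt)

theorem pvFo?_bound (sep l : List Char) (hsep : sep ≠ []) (q : Nat)
    (h : pvFo? sep l = some q) : q + sep.length ≤ l.length := by
  have h1 := (pvFo?_some sep l q h).1
  have h2 := h1.length_le
  have h3 : 0 < sep.length := List.length_pos_of_ne_nil hsep
  simp at h2
  omega

theorem pvFoN_le (sep l : List Char) (hsep : sep ≠ []) : pvFoN sep l ≤ l.length := by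
  rw [pvFoN]
  cases h : pvFo? sep l with
  | none => simp
  | some q => have := pvFo?_bound sep l hsep q h; simp; omega

-- the character at the start of an occurrence of a good divider is a pvFC character
theorem pvOcc_head (d l : List Char) (hg : pvGood d) (q : Nat) (h : d <+: l.drop q)
    (hq : q < l.length) : pvFC (l[q]'hq) = true := by
  match d, hg with
  | c :: t, ⟨_, hc, _⟩ =>
    have hlen := h.length_le
    have h0 : (c :: t)[0]'(by simp) = (l.drop q)[0]'(by simp at hlen ⊢; omega) :=
      h.getElem (by simp)
    rw [List.getElem_drop] at h0
    simp at h0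
    rw [h0] at hc
    simpa using hc

theorem pv_prefix_take_iff (p z : List Char) (k : Nat) :
    p <+: z.take k ↔ p <+: z ∧ p.length ≤ k := by
  constructor
  · intro h
    refine ⟨h.trans (List.take_prefix k z), ?_⟩
    have := h.length_le
    simp at this
    omega
  · rintro ⟨⟨t, rfl⟩, hk⟩
    rw [List.take_append, List.take_of_length_le hk]
    exact ⟨t.take (k - p.length), rfl⟩

theorem pvOcc_take (d l : List Char) (hd : d ≠ []) (m j : Nat) :
    d <+: (l.take m).drop j ↔ d <+: l.drop j ∧ j + d.length ≤ m := by
  rw [List.drop_take, pv_prefix_take_iff]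
  have hdl : 0 < d.length := List.length_pos_of_ne_nil hd
  constructor
  · rintro ⟨h1, h2⟩; exact ⟨h1, by omega⟩
  · rintro ⟨h1, h2⟩; exact ⟨h1, by omega⟩

-- no occurrence of a good divider straddles a boundary m at which l carries a pvFC character
theorem pvStraddle (d l : List Char) (hg : pvGood d) (q m : Nat)
    (hocc : d <+: l.drop q) (hm1 : m ≤ l.length)
    (hm2 : ∀ h : m < l.length, pvFC (l[m]'h) = true) (hq : q < m) : q + d.length ≤ m := by
  by_contra hc
  match d, hg with
  | c :: t, ⟨_, _, ht⟩ =>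
    rw [List.length_cons] at hc
    have hlen := hocc.length_le
    rw [List.length_drop, List.length_cons] at hlen
    have hml : m < l.length := by omega
    have hi : m - q < (c :: t).length := by rw [List.length_cons]; omega
    have h0 : (c :: t)[m - q]'hi = (l.drop q)[m - q]'(by rw [List.length_drop]; omega) :=
      hocc.getElem hi
    rw [List.getElem_drop] at h0
    have hfc := hm2 hml
    have hmem : (c :: t)[m - q]'hi ∈ t := by
      have h1 : 1 ≤ m - q := by omega
      rcases Nat.exists_eq_add_of_le h1 with ⟨i, hi'⟩
      have heq : (c :: t)[m - q]'hi = t[i]'(by rw [List.length_cons] at hi; omega) := by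
        simp only [hi', Nat.add_comm 1 i, List.getElem_cons_succ]
      rw [heq]
      exact List.getElem_mem _
    have hbad := ht _ hmem
    have heq2 : l[q + (m - q)]'(by omega) = l[m]'hml := by congr 1; omega
    rw [h0, heq2, hfc] at hbad
    simp at hbad

theorem pvFo?_take (d l : List Char) (hg : pvGood d) (m : Nat) (hm1 : m ≤ l.length)
    (hm2 : ∀ h : m < l.length, pvFC (l[m]'h) = true) :
    pvFo? d (l.take m) =
      match pvFo? d l with
      | some q => if q < m then some q else none
      | none => none := by
  have hd : d ≠ [] := pvGood_ne hg
  cases h : pvFo? d l with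
  | none =>
    cases h' : pvFo? d (l.take m) with
    | none => rfl
    | some q' =>
      have := ((pvOcc_take d l hd m q').mp (pvFo?_some d (l.take m) q' h').1).1
      exact absurd this (pvFo?_none d l hd h q')
  | some q =>
    obtain ⟨g1, g2⟩ := pvFo?_some d l q h
    by_cases hqm : q < m
    · have hfit : q + d.length ≤ m := pvStraddle d l hg q m g1 hm1 hm2 hqm
      simp only [hqm, if_true]
      apply pvFo?_eq_some_of d _ hd
      · exact (pvOcc_take d l hd m q).mpr ⟨g1, hfit⟩
      · intro j hj hpre
        exact g2 j hj ((pvOcc_take d l hd m j).mp hpre).1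
    · simp only [hqm, if_false]
      cases h' : pvFo? d (l.take m) with
      | none => rfl
      | some q' =>
        obtain ⟨g1', _⟩ := pvFo?_some d (l.take m) q' h'
        obtain ⟨go1, go2⟩ := (pvOcc_take d l hd m q').mp g1'
        have hdl : 0 < d.length := List.length_pos_of_ne_nil hd
        rcases Nat.lt_or_ge q' q with hlt | hge
        · exact absurd go1 (g2 q' hlt)
        · omega

-- strip is rdropWhile ∘ dropWhile
theorem pvStrip_eq (x : List Char) :
    PySem.Chars.strip x =
      List.rdropWhile PySem.Chars.isspace (List.dropWhile PySem.Chars.isspace x) := by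
  simp [PySem.Chars.strip, PySem.Chars.lstrip, PySem.Chars.rstrip, List.rdropWhile]

theorem pvStrip_ws_append (w z : List Char) (hw : ∀ c ∈ w, PySem.Chars.isspace c = true) :
    PySem.Chars.strip (w ++ z) = PySem.Chars.strip z := by
  rw [pvStrip_eq, pvStrip_eq, List.dropWhile_append]
  have hnil : List.dropWhile PySem.Chars.isspace w = [] := by
    rw [List.dropWhile_eq_nil_iff]
    intro x hx
    simp [hw x hx]
  simp [hnil]

theorem pvStrip_strip (x : List Char) :
    PySem.Chars.strip (PySem.Chars.strip x) = PySem.Chars.strip x := by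
  rw [pvStrip_eq x, pvStrip_eq]
  set y := List.dropWhile PySem.Chars.isspace x with hy
  set core := List.rdropWhile PySem.Chars.isspace y with hcore
  have hdw : List.dropWhile PySem.Chars.isspace core = core := by
    rcases hc : core with _ | ⟨c0, ct⟩
    · simp
    · rw [List.dropWhile_cons]
      have hpre : core <+: y := List.rdropWhile_prefix _ _
      rw [hc] at hpre
      have hyne : y ≠ [] := by
        intro hnil
        rw [hnil] at hpre
        simp at hpre
      have hylen : 0 < y.length := List.length_pos_of_ne_nil hyne
      have h0 : (c0 :: ct)[0]'(by simp) = y[0]'hylen := hpre.getElem (by simp)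
      simp at h0
      have hhead : PySem.Chars.isspace (y.head hyne) = false := by
        have := List.head_dropWhile_not PySem.Chars.isspace
          (l := x) (by rw [← hy]; exact hyne)
        simpa [← hy] using this
      rw [List.head_eq_getElem] at hhead
      rw [h0, hhead]
      simp
  rw [hdw, hcore, List.rdropWhile_idempotent]

theorem pvOcc_ws_left (d w t : List Char) (hg : pvGood d)
    (hw : ∀ c ∈ w, PySem.Chars.isspace c = true) (j : Nat) :
    d <+: (w ++ t).drop j ↔ w.length ≤ j ∧ d <+: t.drop (j - w.length) := by
  by_cases hj : w.length ≤ j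
  · rcases Nat.exists_eq_add_of_le hj with ⟨i, rfl⟩
    rw [List.drop_length_add_append]
    simp [hj]
  · constructor
    · intro h
      exfalso
      match d, hg with
      | c :: dt, ⟨hws, _, _⟩ =>
        have hlen := h.length_le
        rw [List.length_drop, List.length_cons] at hlen
        have hjlen : j < (w ++ t).length := by rw [List.length_append] at hlen ⊢; omega
        have h0 : (c :: dt)[0]'(by simp) = ((w ++ t).drop j)[0]'(by rw [List.length_drop]; omega) :=
          h.getElem (by simp)
        rw [List.getElem_drop] at h0
        have hwj := List.getElem_append_left (as := w) (bs := t) (i := j + 0)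
          (by omega) (h' := by omega)
        rw [hwj] at h0
        simp only [List.getElem_cons_zero] at h0
        have hcw := hw (w[j + 0]'(by omega)) (List.getElem_mem (by omega))
        rw [← h0] at hcw
        have hcd := hws c (by simp)
        rw [hcd] at hcw
        simp at hcw
    · rintro ⟨h1, _⟩
      omega

theorem pvOcc_ws_right (d t w : List Char) (hg : pvGood d)
    (hw : ∀ c ∈ w, PySem.Chars.isspace c = true) (j : Nat) :
    d <+: (t ++ w).drop j ↔ d <+: t.drop j := by
  have hd : d ≠ [] := pvGood_ne hg
  have hdl : 0 < d.length := List.length_pos_of_ne_nil hd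
  constructor
  · intro h
    by_cases hj : j ≤ t.length
    · have hsplit : (t ++ w).drop j = t.drop j ++ w := by
        rw [List.drop_append, Nat.sub_eq_zero_of_le hj, List.drop_zero]
      rw [hsplit] at h
      by_cases hfit : j + d.length ≤ t.length
      · have hpt : d <+: (t.drop j ++ w).take (t.drop j).length := by
          rw [pv_prefix_take_iff]
          exact ⟨h, by rw [List.length_drop]; omega⟩
        rwa [List.take_left] at hpt
      · exfalso
        match d, hg with
        | c :: dt, ⟨hws, _, _⟩ =>
          rw [List.length_cons] at hfit
          have hlen := h.length_le
          rw [List.length_append, List.length_drop, List.length_cons] at hlen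
          have hwne : 0 < w.length := by omega
          have hi : t.length - j < (c :: dt).length := by rw [List.length_cons]; omega
          have hib : t.length - j < (t.drop j ++ w).length := by
            rw [List.length_append, List.length_drop]; omega
          have h0 : (c :: dt)[t.length - j]'hi = (t.drop j ++ w)[t.length - j]'hib :=
            h.getElem hi
          have h₁ : (t.drop j).length ≤ t.length - j := by rw [List.length_drop]
          have hr : (t.drop j ++ w)[t.length - j]'hib = w[0]'hwne := by
            rw [List.getElem_append_right h₁]
            congr 1
            rw [List.length_drop]
            omega
          rw [hr] at h0
          have hcw := hw (w[0]'hwne) (List.getElem_mem _)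
          rw [← h0] at hcw
          have hcd := hws _ (List.getElem_mem hi)
          rw [hcd] at hcw
          simp at hcw
    · exfalso
      match d, hg with
      | c :: dt, ⟨hws, _, _⟩ =>
        have hsplit : (t ++ w).drop j = w.drop (j - t.length) := by
          rw [List.drop_append, List.drop_eq_nil_of_le (by omega), List.nil_append]
        rw [hsplit] at h
        have hlen2 := h.length_le
        rw [List.length_drop, List.length_cons] at hlen2
        have h0 : (c :: dt)[0]'(by simp) =
            (w.drop (j - t.length))[0]'(by rw [List.length_drop]; omega) :=
          h.getElem (by simp)
        rw [List.getElem_drop] at h0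
        simp only [List.getElem_cons_zero] at h0
        have hcw := hw (w[j - t.length + 0]'(by omega)) (List.getElem_mem (by omega))
        rw [← h0] at hcw
        have hcd := hws c (by simp)
        rw [hcd] at hcw
        simp at hcw
  · intro h
    have hlen := h.length_le
    rw [List.length_drop] at hlen
    have hj : j + d.length ≤ t.length := by omega
    have hsplit : (t ++ w).drop j = t.drop j ++ w := by
      rw [List.drop_append, Nat.sub_eq_zero_of_le (by omega), List.drop_zero]
    rw [hsplit]
    exact h.trans (List.prefix_append _ _)

-- first occurrence in x vs first occurrence in strip x, for a good divider
theorem pvFo?_strip (d x : List Char) (hg : pvGood d) :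
    pvFo? d x = (pvFo? d (PySem.Chars.strip x)).map
      (· + (x.takeWhile PySem.Chars.isspace).length) := by
  have hd : d ≠ [] := pvGood_ne hg
  set w1 := x.takeWhile PySem.Chars.isspace with hw1def
  set y := x.dropWhile PySem.Chars.isspace with hydef
  set core := PySem.Chars.strip x with hcoredef
  set w2 := List.rtakeWhile PySem.Chars.isspace y with hw2def
  have hcore : core = List.rdropWhile PySem.Chars.isspace y := pvStrip_eq x
  have hx : x = w1 ++ (core ++ w2) := by
    rw [hcore, hw2def, List.rdropWhile_append_rtakeWhile, hw1def, hydef,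
      List.takeWhile_append_dropWhile]
  have hws1 : ∀ c ∈ w1, PySem.Chars.isspace c = true := fun c hc => List.mem_takeWhile_imp hc
  have hws2 : ∀ c ∈ w2, PySem.Chars.isspace c = true := fun c hc => List.mem_rtakeWhile_imp hc
  have hocc : ∀ j, d <+: x.drop j ↔ (w1.length ≤ j ∧ d <+: core.drop (j - w1.length)) := by
    intro j
    conv_lhs => rw [hx]
    rw [pvOcc_ws_left d w1 (core ++ w2) hg hws1 j]
    constructor
    · rintro ⟨hj, hp⟩
      exact ⟨hj, (pvOcc_ws_right d core w2 hg hws2 _).mp hp⟩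
    · rintro ⟨hj, hp⟩
      exact ⟨hj, (pvOcc_ws_right d core w2 hg hws2 _).mpr hp⟩
  cases h : pvFo? d core with
  | none =>
    simp only [Option.map_none]
    cases h' : pvFo? d x with
    | none => rfl
    | some q' =>
      have := (hocc q').mp (pvFo?_some d x q' h').1
      exact absurd this.2 (pvFo?_none d core hd h _)
  | some q =>
    simp only [Option.map_some]
    obtain ⟨g1, g2⟩ := pvFo?_some d core q h
    apply pvFo?_eq_some_of d x hd
    · rw [hocc]
      refine ⟨by omega, ?_⟩
      have : q + w1.length - w1.length = q := by omega
      rw [this]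
      exact g1
    · intro j hj hpre
      obtain ⟨hj1, hp⟩ := (hocc j).mp hpre
      exact g2 (j - w1.length) (by omega) hp

-- A's step on a stripped string cuts where it would cut on the unstripped string
theorem pvK (d x : List Char) (hg : pvGood d) :
    PySem.Chars.strip (pvCut (PySem.Chars.strip x) d) = PySem.Chars.strip (pvCut x d) := by
  have hd : d ≠ [] := pvGood_ne hg
  have hfo := pvFo?_strip d x hg
  set w1 := x.takeWhile PySem.Chars.isspace with hw1def
  set y := x.dropWhile PySem.Chars.isspace with hydef
  set core := PySem.Chars.strip x with hcoredef
  set w2 := List.rtakeWhile PySem.Chars.isspace y with hw2def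
  have hcore : core = List.rdropWhile PySem.Chars.isspace y := pvStrip_eq x
  have hx : x = w1 ++ (core ++ w2) := by
    rw [hcore, hw2def, List.rdropWhile_append_rtakeWhile, hw1def, hydef,
      List.takeWhile_append_dropWhile]
  have hws1 : ∀ c ∈ w1, PySem.Chars.isspace c = true := fun c hc => List.mem_takeWhile_imp hc
  cases h : pvFo? d core with
  | none =>
    rw [h, Option.map_none] at hfo
    rw [pvCut, pvCut, pvFoN, pvFoN, h, hfo]
    simp only [Option.getD_none, List.take_length]
    rw [pvStrip_strip]
  | some q =>
    rw [h, Option.map_some] at hfo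
    rw [pvCut, pvCut, pvFoN, pvFoN, h, hfo]
    simp only [Option.getD_some]
    have hqb := pvFo?_bound d core hd q h
    have htake : x.take (q + w1.length) = w1 ++ (core ++ w2).take q := by
      conv_lhs => rw [hx]
      have : q + w1.length = w1.length + q := by omega
      rw [this, List.take_length_add_append]
    have htake2 : (core ++ w2).take q = core.take q := by
      rw [List.take_append, Nat.sub_eq_zero_of_le (by omega), List.take_zero,
        List.append_nil]
    rw [htake, htake2, pvStrip_ws_append _ _ hws1]

theorem pvMfo_le (l : List Char) (D : List (List Char)) : pvMfo l D ≤ l.length := by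
  induction D with
  | nil => simp [pvMfo]
  | cons d D ih => rw [pvMfo]; omega

theorem pvFoN_some_of_lt (d l : List Char) (h : pvFoN d l < l.length) :
    pvFo? d l = some (pvFoN d l) := by
  rw [pvFoN] at h ⊢
  cases hq : pvFo? d l with
  | none => rw [hq] at h; simp at h
  | some q => simp

theorem pvFoN_head (d l : List Char) (hg : pvGood d) :
    ∀ h : pvFoN d l < l.length, pvFC (l[pvFoN d l]'h) = true := by
  intro h
  have hsome := pvFoN_some_of_lt d l h
  exact pvOcc_head d l hg _ (pvFo?_some d l _ hsome).1 h

-- A's remaining loop rounds, started from strip (l.take m): the cut point only ever moves left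
theorem pvChain (D : List (List Char)) (hD : ∀ d ∈ D, pvGood d) :
    ∀ (l : List Char) (m : Nat), m ≤ l.length → (∀ h : m < l.length, pvFC (l[m]'h) = true) →
    List.foldl (fun a d => pvStepA d a) (PySem.Chars.strip (l.take m)) D
      = PySem.Chars.strip (l.take (min m (pvMfo l D))) := by
  induction D with
  | nil =>
    intro l m hm _
    simp [pvMfo, Nat.min_eq_left hm]
  | cons d D ih =>
    intro l m hm hfc
    rw [List.foldl_cons]
    have hg := hD d (by simp)
    have hd : d ≠ [] := pvGood_ne hg
    have hstep : pvStepA d (PySem.Chars.strip (l.take m))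
        = PySem.Chars.strip (l.take (min m (pvFoN d l))) := by
      rw [pvStepA, pvK d (l.take m) hg, pvCut, pvFoN, pvFo?_take d l hg m hm hfc]
      cases h : pvFo? d l with
      | none =>
        simp only [Option.getD_none, List.take_length, pvFoN, h]
        rw [Nat.min_eq_left (by omega)]
      | some q =>
        have hfoN : pvFoN d l = q := by rw [pvFoN, h]; rfl
        rw [hfoN]
        by_cases hq : q < m
        · simp only [hq, if_true, Option.getD_some]
          rw [List.take_take, Nat.min_comm q m]
        · simp only [hq, if_false, Option.getD_none, List.take_length]
          rw [Nat.min_eq_left (by omega)]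
    rw [hstep]
    have hm' : min m (pvFoN d l) ≤ l.length := by omega
    have hfc' : ∀ h : min m (pvFoN d l) < l.length,
        pvFC (l[min m (pvFoN d l)]'h) = true := by
      intro h
      by_cases hle : m ≤ pvFoN d l
      · have : min m (pvFoN d l) = m := by omega
        simp only [this] at h ⊢
        exact hfc h
      · have : min m (pvFoN d l) = pvFoN d l := by omega
        simp only [this] at h ⊢
        exact pvFoN_head d l hg h
    rw [ih (fun x hx => hD x (by simp [hx])) l (min m (pvFoN d l)) hm' hfc']
    congr 2
    rw [pvMfo]
    omega

-- ===== glue: port A =====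

theorem pv_getLast?_cons_ne {α : Type} (x : α) (acc : List α) (hacc : acc ≠ []) :
    (x :: acc).getLast? = acc.getLast? := by
  obtain ⟨a, as, rfl⟩ := List.exists_cons_of_ne_nil hacc
  simp

theorem pvGo_head_ne (sep : List Char) (hsep : sep ≠ []) : ∀ (fuel : Nat) (l cur : List Char)
    (acc : List (List Char)), acc ≠ [] → l.length < fuel →
    (PySem.Chars.splitOn.go sep fuel l cur acc).head? = acc.getLast?
  | 0, l, cur, acc, hacc, hf => by omega
  | fuel+1, [], cur, acc, hacc, hf => by
    obtain ⟨a, as, rfl⟩ := List.exists_cons_of_ne_nil hacc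
    rw [PySem.Chars.splitOn.go]
    · simp [List.getLast?_cons]
    · omega
  | fuel+1, c :: rest, cur, acc, hacc, hf => by
    rw [PySem.Chars.splitOn.go]
    by_cases h : sep.isPrefixOf (c :: rest)
    · simp only [h, if_true]
      rw [pvGo_head_ne sep hsep fuel _ _ _ (by simp) (by
        have h1 := List.length_pos_of_ne_nil hsep
        simp at hf ⊢; omega)]
      exact pv_getLast?_cons_ne _ _ hacc
    · simp only [h]
      rw [if_neg (by simp)]
      rw [pvGo_head_ne sep hsep fuel _ _ _ hacc (by simp at hf ⊢; omega)]

theorem pvGo_head_nil (sep : List Char) (hsep : sep ≠ []) : ∀ (fuel : Nat) (l cur : List Char),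
    l.length < fuel →
    (PySem.Chars.splitOn.go sep fuel l cur []).head? =
      some (cur.reverse ++ l.take ((pvFo? sep l).getD l.length))
  | 0, l, cur, hf => by omega
  | fuel+1, [], cur, hf => by
    rw [PySem.Chars.splitOn.go]
    · simp [pvFo?]
    · omega
  | fuel+1, c :: rest, cur, hf => by
    rw [PySem.Chars.splitOn.go]
    by_cases h : sep.isPrefixOf (c :: rest)
    · simp only [h, if_true, pvFo?]
      rw [pvGo_head_ne sep hsep fuel _ _ _ (by simp) (by
        have h1 := List.length_pos_of_ne_nil hsep
        simp at hf ⊢; omega)]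
      simp
    · simp only [h, pvFo?]
      rw [if_neg (by simp), if_neg (by simp),
        pvGo_head_nil sep hsep fuel rest (c :: cur) (by simp at hf ⊢; omega)]
      cases hq : pvFo? sep rest <;> simp

theorem pvSplitOn_head (sep l : List Char) (hsep : sep ≠ []) :
    (PySem.Chars.splitOn l sep).head? = some (l.take (pvFoN sep l)) := by
  rw [PySem.Chars.splitOn, pvGo_head_nil sep hsep _ l [] (by omega), pvFoN]
  simp

theorem pvStepA_toList (a fix : String) (hfix : fix.toList ≠ []) :
    (PySem.Str.strip (PySem.List.pyGetD ((PySem.Str.split? a fix).getD []) 0 "")).toList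
      = pvStepA fix.toList a.toList := by
  have hsplit := PySem.Str.split?_map a fix
  rw [PySem.Chars.split?, if_neg (by simpa [List.isEmpty_iff] using hfix)] at hsplit
  cases hsp : PySem.Str.split? a fix with
  | none => rw [hsp] at hsplit; simp at hsplit
  | some parts =>
    rw [hsp] at hsplit
    simp only [Option.map_some, Option.some.injEq] at hsplit
    have hhead := pvSplitOn_head fix.toList a.toList hfix
    rw [← hsplit] at hhead
    cases parts with
    | nil => simp at hhead
    | cons p rest =>
      simp only [List.map_cons, List.head?_cons, Option.some.injEq] at hhead
      simp only [Option.getD_some, PySem.List.pyGetD_zero, List.getD_cons_zero]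
      rw [PySem.Str.toList_strip, pvStepA, pvCut, hhead]

theorem pvFoldA (ds : List String) (hds : ∀ d ∈ ds, d.toList ≠ []) : ∀ (a : String),
    (List.foldl
      (fun a fix => PySem.Str.strip (PySem.List.pyGetD ((PySem.Str.split? a fix).getD []) 0 ""))
      a ds).toList
      = List.foldl (fun x d => pvStepA d x) a.toList (ds.map String.toList) := by
  induction ds with
  | nil => intro a; simp
  | cons d ds ih =>
    intro a
    rw [List.foldl_cons, List.map_cons, List.foldl_cons,
      ih (fun x hx => hds x (by simp [hx])), pvStepA_toList a d (hds d (by simp))]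

-- ===== glue: port B =====

theorem pvFind_eq (l sep : List Char) (hsep : sep ≠ []) :
    PySem.Chars.find l sep = match pvFo? sep l with | some q => (q : Int) | none => -1 := by
  rw [PySem.Chars.find, find_go_eq sep hsep l 0]
  cases pvFo? sep l <;> simp
where
  find_go_eq (sep : List Char) (hsep : sep ≠ []) : ∀ (l : List Char) (k : Nat),
      PySem.Chars.find.go sep l k =
        match pvFo? sep l with | some q => ((k + q : Nat) : Int) | none => -1
    | [], k => by simp [PySem.Chars.find.go, pvFo?, List.isEmpty_iff, hsep]
    | c :: t, k => by
      rw [PySem.Chars.find.go]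
      by_cases h : sep.isPrefixOf (c :: t)
      · simp [h, pvFo?]
      · simp only [h, pvFo?, find_go_eq sep hsep t (k+1)]
        rw [if_neg (by simp)]
        cases hq : pvFo? sep t <;> simp
        ring

theorem pvPosi (l : List Char) (D : List (List Char)) (hD : ∀ d ∈ D, d ≠ []) :
    (D.map (fun d => PySem.Chars.find l d)).filter (fun p => p != -1)
      = (D.filterMap (fun d => pvFo? d l)).map (fun (q : Nat) => (q : Int)) := by
  induction D with
  | nil => simp
  | cons d D ih =>
    have hD2 : ∀ x ∈ D, x ≠ [] := fun x hx => hD x (by simp [hx])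
    rw [List.map_cons, List.filter_cons, pvFind_eq l d (hD d (by simp)),
      List.filterMap_cons]
    cases h : pvFo? d l with
    | none =>
      simp only []
      rw [if_neg (by simp)]
      exact ih hD2
    | some q =>
      simp only []
      rw [if_pos (by simp), List.map_cons, ih hD2]

theorem pvFoldlMin_cast (rest : List Nat) : ∀ (q : Nat),
    List.foldl min ((q : Nat) : Int) (rest.map (fun (x : Nat) => (x : Int)))
      = ((rest.foldl min q : Nat) : Int) := by
  induction rest with
  | nil => intro q; simp
  | cons r rest ih =>
    intro q
    rw [List.map_cons, List.foldl_cons, List.foldl_cons, ← Nat.cast_min, ih (min q r)]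

theorem pvMfoFold (l : List Char) (D : List (List Char)) (hD : ∀ d ∈ D, d ≠ []) :
    ∀ (a : Nat), a ≤ l.length →
    (D.filterMap (fun d => pvFo? d l)).foldl min a = min a (pvMfo l D) := by
  induction D with
  | nil => intro a ha; simp [pvMfo]; omega
  | cons d D ih =>
    intro a ha
    rw [List.filterMap_cons]
    have hd : d ≠ [] := hD d (by simp)
    have hmle := pvMfo_le l D
    cases h : pvFo? d l with
    | none =>
      rw [ih (fun x hx => hD x (by simp [hx])) a ha, pvMfo, pvFoN, h]
      simp only [Option.getD_none]
      omega
    | some q =>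
      have hqlen : q ≤ l.length := by
        have := pvFo?_bound d l hd q h
        omega
      rw [List.foldl_cons, ih (fun x hx => hD x (by simp [hx])) (min a q) (by omega),
        pvMfo, pvFoN, h]
      simp only [Option.getD_some]
      omega

theorem pvBmain (artist : String) (ds : List String)
    (hD : ∀ d ∈ ds.map String.toList, pvGood d) :
    (PySem.Str.strip
      (match PySem.List.min?
          ((ds.map (fun d => PySem.Str.find artist d)).filter (fun p => p != -1))
          (fun p => p) with
        | some m => PySem.Str.slice artist none (some m)
        | none => artist)).toList
      = PySem.Chars.strip (artist.toList.take (pvMfo artist.toList (ds.map String.toList))) := by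
  have hD' : ∀ d ∈ ds.map String.toList, d ≠ [] := fun d hd => pvGood_ne (hD d hd)
  set l := artist.toList with hl
  set D := ds.map String.toList with hDdef
  have hpos : (ds.map (fun d => PySem.Str.find artist d))
      = D.map (fun d => PySem.Chars.find l d) := by
    rw [hDdef, List.map_map]
    apply List.map_congr_left
    intro a _
    simp [PySem.Str.find_eq, hl]
  rw [PySem.Str.toList_strip, hpos, pvPosi l D hD']
  cases hqs : D.filterMap (fun d => pvFo? d l) with
  | nil =>
    have h1 := pvMfoFold l D hD' l.length (le_refl _)
    rw [hqs] at h1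
    simp only [List.foldl_nil] at h1
    have h2 := pvMfo_le l D
    have h3 : pvMfo l D = l.length := by omega
    rw [List.map_nil, PySem.List.min?, List.foldl_nil, h3, List.take_length]
  | cons q rest =>
    have h1 := pvMfoFold l D hD' l.length (le_refl _)
    rw [hqs] at h1
    have hq : q ∈ D.filterMap (fun d => pvFo? d l) := by rw [hqs]; simp
    obtain ⟨d, hdmem, hdq⟩ := List.mem_filterMap.mp hq
    have hqlen : q ≤ l.length := by
      have := pvFo?_bound d l (hD' d hdmem) q hdq
      omega
    have h2 := pvMfo_le l D
    have hfold : (q :: rest).foldl min l.length = rest.foldl min q := by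
      rw [List.foldl_cons, Nat.min_eq_right hqlen]
    rw [hfold] at h1
    rw [List.map_cons, PySem.List.min?_id_cons, pvFoldlMin_cast]
    simp only []
    rw [PySem.Str.toList_slice]
    rw [show PySem.Chars.slice l none (some ((rest.foldl min q : Nat) : Int))
        = PySem.List.slice l none (some ((rest.foldl min q : Nat) : Int)) from by
      simp [PySem.Chars.slice_eq_listSlice]]
    rw [PySem.List.slice_to _ (Int.natCast_nonneg _)]
    have htn : ((rest.foldl min q : Nat) : Int).toNat = rest.foldl min q := by simp
    rw [htn, h1, Nat.min_eq_right h2]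

-- ===== final assembly =====

theorem pvExcLoop_eq : ∀ (es : List String) (a : String), excLoopA es a = excLoopB es a := by
  intro es
  induction es with
  | nil => intro a; rfl
  | cons e rest ih =>
    intro a
    rw [excLoopA, excLoopB, ih a]

theorem pvAllNoWs (l : List Char) (h : l.all (fun x => !PySem.Chars.isspace x) = true) :
    ∀ x ∈ l, PySem.Chars.isspace x = false := by
  intro x hx
  simpa using List.all_eq_true.mp h x hx

theorem pvAllNoFC (l : List Char) (h : l.all (fun x => !pvFC x) = true) :
    ∀ x ∈ l, pvFC x = false := by
  intro x hx
  simpa using List.all_eq_true.mp h x hx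

theorem pvGoods : ∀ d ∈ [",".toList, "/".toList, "Ft.".toList, "feat.".toList,
    "Feat".toList, "&".toList], pvGood d := by
  intro d hd
  simp only [List.mem_cons, List.not_mem_nil, or_false] at hd
  rcases hd with rfl|rfl|rfl|rfl|rfl|rfl <;>
    exact ⟨pvAllNoWs _ (by decide), by decide, pvAllNoFC _ (by decide)⟩

-- ===== VERDICT (by name: the statement is the Claim_ definition above) =====
theorem filter_artist_spec : Claim_equal_filter_artist := by
  intro artist _
  unfold Spec_filter_artist filter_artist filter_artist_alt
  rw [pvExcLoop_eq]
  cases h : excLoopB ["Zion & Lennox", "AC/DC", "Flamman & Abraxas"] artist with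
  | some e => rfl
  | none =>
    apply String.toList_inj.mp
    set l := artist.toList with hl
    have hA := pvFoldA [",", "/", "Ft.", "feat.", "Feat", "&"] (by
      intro d hd
      simp only [List.mem_cons, List.not_mem_nil, or_false] at hd
      rcases hd with rfl|rfl|rfl|rfl|rfl|rfl <;> decide) artist
    rw [hA]
    have hmap : ([",", "/", "Ft.", "feat.", "Feat", "&"].map String.toList)
        = [",".toList, "/".toList, "Ft.".toList, "feat.".toList, "Feat".toList, "&".toList] := rfl
    rw [hmap, List.foldl_cons]
    have hg1 : pvGood (",".toList) := pvGoods _ (List.mem_cons_self ..)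
    have hd1 : (",".toList) ≠ [] := pvGood_ne hg1
    have hstep1 : pvStepA (",".toList) l = PySem.Chars.strip (l.take (pvFoN (",".toList) l)) := by
      rw [pvStepA, pvCut]
    rw [hstep1,
      pvChain ["/".toList, "Ft.".toList, "feat.".toList, "Feat".toList, "&".toList]
        (fun d hd => pvGoods d (List.mem_cons_of_mem _ hd)) l (pvFoN (",".toList) l)
        (pvFoN_le _ l hd1) (pvFoN_head _ l hg1)]
    rw [pvBmain artist [",", "/", "Ft.", "feat.", "Feat", "&"] (by rw [hmap]; exact pvGoods),
      hmap, ← hl]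
    rfl
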